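-- pv_equiv track=rewrite | github.com/scottshepard/advent-of-code | 2015/Day19/day19.py | _parse_replacements
-- ===== SOURCE A (Python) =====
-- def _parse_replacements(replacements_list):
--     replacements_dict = {}
--     for r in replacements_list:
--         r = r.split(' => ')
--         if r[0] in replacements_dict.keys():
--             replacements_dict[r[0]].append(r[1])
--         else:
--             replacements_dict[r[0]] = [r[1]]
--     return replacements_dict
-- ===== SOURCE B (Python) =====
-- def _parse_replacements(replacements_list):
--     pairs = [r.split(' => ') for r in replacements_list]
--     keys = list(dict.fromkeys(p[0] for p in pairs))
--     return {k: [p[1] for p in pairs if p[0] == k] for k in keys}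
-- ===== Notes on version B (the rewrite author's own statement) =====
-- stated objective: alternative
-- what changed: Replaces the online accumulate-into-dict loop (membership test, append-or-insert per line) by a two-pass grouping pipeline: split all lines once, dedup the keys in first-occurrence order, then build each key's value list with one comprehension.
import Mathlib
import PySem

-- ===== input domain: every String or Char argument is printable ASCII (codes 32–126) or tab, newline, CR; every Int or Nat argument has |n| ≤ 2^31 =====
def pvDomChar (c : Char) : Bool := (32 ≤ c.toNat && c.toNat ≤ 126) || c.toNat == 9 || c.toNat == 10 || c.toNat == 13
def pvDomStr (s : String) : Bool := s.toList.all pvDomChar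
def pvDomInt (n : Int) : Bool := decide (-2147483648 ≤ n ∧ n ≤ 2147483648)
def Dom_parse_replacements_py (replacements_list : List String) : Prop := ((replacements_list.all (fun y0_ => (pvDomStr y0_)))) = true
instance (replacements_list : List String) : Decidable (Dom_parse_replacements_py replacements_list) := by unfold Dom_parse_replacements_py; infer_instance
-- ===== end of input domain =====

-- B replaces A's online accumulate-into-dict loop by a two-pass grouping pipeline
-- (split all lines, dedup keys in first-occurrence order, one filter/map per key); alternative, not faster.

-- r.split(' => '): separator is the nonempty literal " => ", so split? is always `some`
def pvSplitArrow (r : String) : List String := (PySem.Str.split? r " => ").getD []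

-- r[0] / r[1]: exact inside Pre_ (both indices exist there); outside Pre_ the Python raises IndexError
def pvKey (p : List String) : String := (PySem.List.pyGet? p 0).getD ""
def pvVal (p : List String) : String := (PySem.List.pyGet? p 1).getD ""

-- ===== PORT A =====
def parse_replacements_py (replacements_list : List String) : List (String × List String) :=
  (replacements_list.foldl
    (fun d r0 =>
      let r := pvSplitArrow r0
      if d.contains (pvKey r) then
        d.modify (pvKey r) [] (fun vs => vs ++ [pvVal r])   -- replacements_dict[r[0]].append(r[1])
      else
        d.insert (pvKey r) [pvVal r])                       -- replacements_dict[r[0]] = [r[1]]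
    PySem.Dict.empty).items

-- ===== PORT B =====
def parse_replacements_py_alt (replacements_list : List String) : List (String × List String) :=
  let pairs := replacements_list.map pvSplitArrow
  let keys := PySem.List.dedup (pairs.map pvKey)            -- list(dict.fromkeys(p[0] for p in pairs))
  keys.map (fun k => (k, (pairs.filter (fun p => pvKey p == k)).map pvVal))

-- ===== PRECONDITION & SPEC =====
-- Pre_ excludes exactly the inputs where Python A raises (IndexError on a line without ' => '); B raises there too.
def Pre_parse_replacements_py (replacements_list : List String) : Prop :=
  (replacements_list.all (fun s => 2 ≤ ((PySem.Str.split? s " => ").getD []).length)) = true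
instance (replacements_list : List String) : Decidable (Pre_parse_replacements_py replacements_list) := by unfold Pre_parse_replacements_py; infer_instance
def pvWitness_parse_replacements_py : List String := ["H => HO", "H => OH", "O => HH"]
def Spec_parse_replacements_py (replacements_list : List String) (out : List (String × List String)) : Prop := out = parse_replacements_py_alt replacements_list
instance (replacements_list : List String) (out : List (String × List String)) : Decidable (Spec_parse_replacements_py replacements_list out) := by unfold Spec_parse_replacements_py; infer_instance

-- ===== CLAIM (what is proved, stated in full; the proofs are below) =====
def Claim_equal_parse_replacements_py : Prop := ∀ (replacements_list : List String), Dom_parse_replacements_py replacements_list → Pre_parse_replacements_py replacements_list → Spec_parse_replacements_py replacements_list (parse_replacements_py replacements_list)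

-- ===== LEMMAS AND PROOFS =====

-- A's branch collapses: on a missing key, insert k [v] = modify k [] (· ++ [v]).
theorem pv_step_eq (d : PySem.Dict String (List String)) (r : List String) :
    (if d.contains (pvKey r) then d.modify (pvKey r) [] (fun vs => vs ++ [pvVal r])
     else d.insert (pvKey r) [pvVal r])
    = d.modify (pvKey r) [] (fun vs => vs ++ [pvVal r]) := by
  by_cases h : d.contains (pvKey r)
  · simp [h]
  · simp only [Bool.not_eq_true] at h
    simp [h, PySem.Dict.modify, PySem.Dict.getD_of_not_contains d [] h]

-- A's whole loop, as a modify-fold over the (key, value) pairs.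
theorem pv_A_eq_fold (l : List String) :
    parse_replacements_py l
    = (((l.map pvSplitArrow).map (fun p => (pvKey p, pvVal p))).foldl
        (fun d q => d.modify q.1 [] (fun vs => vs ++ [q.2])) PySem.Dict.empty).items := by
  unfold parse_replacements_py
  simp only [List.foldl_map]
  congr 1
  apply PySem.List.foldl_congr_mem
  intro d r _
  exact pv_step_eq d (pvSplitArrow r)

theorem pv_equal (l : List String) : parse_replacements_py l = parse_replacements_py_alt l := by
  rw [pv_A_eq_fold]
  unfold parse_replacements_py_alt
  set pairs := l.map pvSplitArrow with hp
  set kvs := pairs.map (fun p => (pvKey p, pvVal p)) with hkvs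
  have hnd : ((kvs.foldl (fun d q => d.modify q.1 [] (fun vs => vs ++ [q.2])) PySem.Dict.empty).keys).Nodup := by
    exact PySem.Dict.nodup_keys_foldl_modify_key kvs Prod.fst [] (fun _ q => (fun vs => vs ++ [q.2])) _ PySem.Dict.nodup_keys_empty
  rw [PySem.Dict.items_eq_map_keys _ hnd []]
  have hkeys : (kvs.foldl (fun d q => d.modify q.1 [] (fun vs => vs ++ [q.2])) PySem.Dict.empty).keys
      = PySem.List.dedup (pairs.map pvKey) := by
    rw [PySem.Dict.keys_foldl_modify_key kvs Prod.fst [] (fun _ q => (fun vs => vs ++ [q.2])) PySem.Dict.empty]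
    rw [PySem.List.dedup_eq_ofList, PySem.Dict.keys_empty, hkvs, List.map_map]
    rfl
  rw [hkeys]
  apply List.map_congr_left
  intro k _
  refine congrArg (fun w => (k, w)) ?_
  rw [PySem.Dict.getD_foldl_modify_append kvs PySem.Dict.empty k, PySem.Dict.getD_empty]
  rw [hkvs, List.filter_map, List.map_map]
  rfl

-- ===== VERDICT (by name: the statement is the Claim_ definition above) =====
theorem parse_replacements_py_spec : Claim_equal_parse_replacements_py := by
  intro l _ _
  unfold Spec_parse_replacements_py
  exact pv_equal l
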